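-- pv_equiv track=rewrite | github.com/DevGremlin123/NameAI | nameai/inference/filter.py | contains_blocked_word
-- ===== SOURCE A (Python) =====
-- def contains_blocked_word(name: str, blocklist: set[str]) -> bool:
--     """Check if a name contains any blocked word/pattern.
--
--     Short patterns (<=3 chars) only match as suffix to avoid false positives
--     (e.g. "fy" shouldn't block "Spotify").
--     Longer patterns match as substring anywhere in the name.
--     """
--     name_lower = name.lower()
--     for blocked in blocklist:
--         if len(blocked) <= 3:
--             # Short patterns: only block if the name ends with it
--             if name_lower.endswith(blocked):
--                 return True
--         else:
--             if blocked in name_lower: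
--                 return True
--     return False
-- ===== SOURCE B (Python) =====
-- def contains_blocked_word(name: str, blocklist: set[str]) -> bool:
--     """Text-driven multi-pattern scan: bucket the patterns once by their first
--     character, then walk the lowered name left to right, at each position trying
--     only the patterns whose first character matches, with one unified rule
--     (a short pattern must end exactly at the end of the name)."""
--     name_lower = name.lower()
--     if "" in blocklist:
--         return True  # the empty pattern is a suffix of every name
--     index = {}
--     for b in blocklist:
--         index.setdefault(b[0], []).append(b)
--     n = len(name_lower)
--     for i in range(n):
--         for b in index.get(name_lower[i], ()):
--             if (len(b) > 3 or i + len(b) == n) and name_lower.startswith(b, i):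
--                 return True
--     return False
-- ===== Notes on version B (the rewrite author's own statement) =====
-- stated objective: alternative
-- what changed: B replaces A's pattern-by-pattern endswith/substring loop with a text-driven multi-pattern scan: it buckets the patterns once into a dict keyed by first character, then walks the name left to right trying at each position only the patterns whose first character matches, with one unified startswith-at-i rule (short patterns must end at the end of the name).
import Mathlib
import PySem

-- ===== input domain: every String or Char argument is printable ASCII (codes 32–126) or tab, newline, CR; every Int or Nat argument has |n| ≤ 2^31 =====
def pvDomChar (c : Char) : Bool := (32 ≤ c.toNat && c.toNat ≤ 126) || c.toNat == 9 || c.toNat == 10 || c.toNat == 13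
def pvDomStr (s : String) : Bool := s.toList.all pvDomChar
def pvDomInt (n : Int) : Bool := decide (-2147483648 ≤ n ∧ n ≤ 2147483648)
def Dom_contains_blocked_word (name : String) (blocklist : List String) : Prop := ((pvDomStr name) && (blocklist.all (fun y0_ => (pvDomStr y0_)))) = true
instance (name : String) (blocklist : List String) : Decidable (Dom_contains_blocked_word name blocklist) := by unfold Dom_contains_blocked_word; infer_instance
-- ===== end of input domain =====

-- B is a text-driven multi-pattern scan over a first-character bucket index instead of
-- A's pattern-by-pattern endswith/substring loop (alternative algorithm, same result).

-- ===== PORT A =====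
-- the 'for blocked in blocklist: …' loop with its early returns
def pvLoopA (name_lower : String) : List String → Bool
  | [] => false
  | blocked :: rest =>
    if PySem.Str.len blocked ≤ 3 then
      if PySem.Str.endswith name_lower blocked then true else pvLoopA name_lower rest
    else
      if PySem.Str.isIn blocked name_lower then true else pvLoopA name_lower rest

def contains_blocked_word (name : String) (blocklist : List String) : Bool :=
  pvLoopA (PySem.Str.lower name) blocklist

-- ===== PORT B =====
-- index.setdefault(b[0], []).append(b); the [] branch is a totality guard only
-- (unreachable: '"" in blocklist' is handled before the build loop runs)
def pvBucketAdd (d : PySem.Dict Char (List String)) (b : String) : PySem.Dict Char (List String) :=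
  match b.toList with
  | [] => d
  | c :: _ => d.insert c (d.getD c [] ++ [b])

-- 'for b in blocklist: index.setdefault(b[0], []).append(b)'
def pvIndex (bl : List String) : PySem.Dict Char (List String) :=
  bl.foldl pvBucketAdd PySem.Dict.empty

-- '(len(b) > 3 or i + len(b) == n) and name_lower.startswith(b, i)';
-- startswith(b, i) with 0 ≤ i ≤ n is exactly 'b is a prefix of the chars from i on'
def pvHit (nl : List Char) (i : Nat) (b : String) : Bool :=
  (decide (3 < b.toList.length) || decide (i + b.toList.length = nl.length)) &&
    b.toList.isPrefixOf (nl.drop i)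

-- 'for i in range(n): for b in index.get(name_lower[i], ()): …' with its early return
def pvScan (idx : PySem.Dict Char (List String)) (nl : List Char) (i : Nat) : Bool :=
  if h : i < nl.length then
    if (idx.getD nl[i] []).any (pvHit nl i) then true else pvScan idx nl (i + 1)
  else false
termination_by nl.length - i

def contains_blocked_word_alt (name : String) (blocklist : List String) : Bool :=
  let nl := (PySem.Str.lower name).toList
  if blocklist.contains "" then true
  else pvScan (pvIndex blocklist) nl 0

-- ===== PRECONDITION & SPEC =====
def Spec_contains_blocked_word (name : String) (blocklist : List String) (out : Bool) : Prop := out = contains_blocked_word_alt name blocklist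
instance (name : String) (blocklist : List String) (out : Bool) : Decidable (Spec_contains_blocked_word name blocklist out) := by unfold Spec_contains_blocked_word; infer_instance

-- ===== CLAIM (what is proved, stated in full; the proofs are below) =====
def Claim_equal_contains_blocked_word : Prop := ∀ (name : String) (blocklist : List String), Dom_contains_blocked_word name blocklist → Spec_contains_blocked_word name blocklist (contains_blocked_word name blocklist)

-- ===== LEMMAS AND PROOFS =====

-- A's loop is an 'any' over the pointwise test
theorem pvLoopA_eq_any (nl : String) (bl : List String) :
    pvLoopA nl bl = bl.any (fun b =>
      if PySem.Str.len b ≤ 3 then PySem.Str.endswith nl b else PySem.Str.isIn b nl) := by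
  induction bl with
  | nil => rfl
  | cons b rest ih =>
    simp only [pvLoopA, List.any_cons, ih]
    split_ifs with h1 h2 h3
    · rw [h2, Bool.true_or]
    · rw [Bool.not_eq_true] at h2; rw [h2, Bool.false_or]
    · rw [h3, Bool.true_or]
    · rw [Bool.not_eq_true] at h3; rw [h3, Bool.false_or]

-- invariant of the bucket-building loop: what ends up in bucket c
theorem pvBucket_inv (bl : List String) (d : PySem.Dict Char (List String)) (c : Char) (x : String) :
    x ∈ (bl.foldl pvBucketAdd d).getD c [] ↔
      x ∈ d.getD c [] ∨ (x ∈ bl ∧ ∃ t, x.toList = c :: t) := by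
  induction bl generalizing d with
  | nil => simp
  | cons b rest ih =>
    simp only [List.foldl_cons, ih]
    unfold pvBucketAdd
    cases hb : b.toList with
    | nil =>
      simp only [List.mem_cons]
      constructor
      · rintro (h | ⟨h1, t, h2⟩)
        · exact Or.inl h
        · exact Or.inr ⟨Or.inr h1, t, h2⟩
      · rintro (h | ⟨h1 | h1, t, h2⟩)
        · exact Or.inl h
        · exfalso; rw [h1, hb] at h2; cases h2
        · exact Or.inr ⟨h1, t, h2⟩
    | cons c' tl =>
      by_cases hc : c = c'
      · subst hc
        rw [PySem.Dict.getD_insert_self]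
        simp only [List.mem_append, List.mem_cons]
        constructor
        · rintro ((h | (rfl | h)) | ⟨h1, t, h2⟩)
          · exact Or.inl h
          · exact Or.inr ⟨Or.inl rfl, tl, hb⟩
          · cases h
          · exact Or.inr ⟨Or.inr h1, t, h2⟩
        · rintro (h | ⟨rfl | h1, t, h2⟩)
          · exact Or.inl (Or.inl h)
          · exact Or.inl (Or.inr (Or.inl rfl))
          · exact Or.inr ⟨h1, t, h2⟩
      · rw [PySem.Dict.getD_insert_of_ne (hne := hc)]
        simp only [List.mem_cons]
        constructor
        · rintro (h | ⟨h1, t, h2⟩)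
          · exact Or.inl h
          · exact Or.inr ⟨Or.inr h1, t, h2⟩
        · rintro (h | ⟨h1 | h1, t, h2⟩)
          · exact Or.inl h
          · exfalso; rw [h1, hb] at h2; cases h2; exact hc rfl
          · exact Or.inr ⟨h1, t, h2⟩

-- bucket c of the finished index holds exactly the listed patterns starting with c
theorem pvIndex_mem (bl : List String) (c : Char) (x : String) :
    x ∈ (pvIndex bl).getD c [] ↔ x ∈ bl ∧ ∃ t, x.toList = c :: t := by
  rw [pvIndex, pvBucket_inv]
  simp [PySem.Dict.empty, PySem.Dict.getD, PySem.Dict.get?]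

-- the scan from i is an existential over positions j ≥ i
theorem pvScan_eq_true_iff (idx : PySem.Dict Char (List String)) (nl : List Char) (i : Nat) :
    pvScan idx nl i = true ↔
      ∃ j, ∃ h : j < nl.length, i ≤ j ∧ (idx.getD nl[j] []).any (pvHit nl j) = true := by
  fun_induction pvScan idx nl i with
  | case1 i h hany =>
    simp only [true_iff]
    exact ⟨i, h, le_refl i, by simpa using hany⟩
  | case2 i h hany ih =>
    rw [ih]
    constructor
    · rintro ⟨j, hj, hij, ha⟩; exact ⟨j, hj, by omega, ha⟩
    · rintro ⟨j, hj, hij, ha⟩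
      rcases Nat.eq_or_lt_of_le hij with rfl | hlt
      · exact absurd ha (by simpa using hany)
      · exact ⟨j, hj, by omega, ha⟩
  | case3 i h =>
    simp only [Bool.false_eq_true, false_iff]
    rintro ⟨j, hj, hij, -⟩; omega

-- a pattern hits at some position iff it is a suffix (short side) / infix (long side)
theorem pv_match_bridge (nl : List Char) (b : String) :
    ((b.toList.length ≤ 3 ∧ b.toList <:+ nl) ∨ (3 < b.toList.length ∧ b.toList <:+: nl)) ↔
    (b = "" ∨ ∃ j, ∃ h : j < nl.length, (∃ t, b.toList = nl[j] :: t) ∧ pvHit nl j b = true) := by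
  constructor
  · rintro (⟨hlen, hsuf⟩ | ⟨hlen, hinf⟩)
    · cases hb : b.toList with
      | nil => exact Or.inl (String.toList_inj.mp (by simp [hb]))
      | cons c t =>
        refine Or.inr ?_
        have hle : b.toList.length ≤ nl.length := hsuf.length_le
        have hpos : 0 < b.toList.length := by rw [hb]; simp
        set j := nl.length - b.toList.length with hj
        have hjlt : j < nl.length := by omega
        have hdropped : b.toList = nl.drop j := List.suffix_iff_eq_drop.mp hsuf
        have hdj : nl.drop j = c :: t := by rw [← hdropped, hb]
        have hcj : nl[j] = c := by
          have h0 : (nl.drop j)[0]'(by rw [hdj]; simp) = c := by simp [hdj]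
          simpa using h0
        refine ⟨j, hjlt, ⟨t, by rw [hcj]⟩, ?_⟩
        unfold pvHit
        rw [Bool.and_eq_true, Bool.or_eq_true]
        refine ⟨Or.inr (by simp only [decide_eq_true_eq]; omega), ?_⟩
        rw [← hdropped]
        simp [List.isPrefixOf_iff_prefix]
    · cases hb : b.toList with
      | nil => simp [hb] at hlen
      | cons c t =>
        refine Or.inr ?_
        have hisin : PySem.Chars.isIn b.toList nl = true :=
          (PySem.Chars.isIn_iff_infix _ _).mpr hinf
        obtain ⟨j, hpre⟩ := (PySem.Chars.exists_prefix_drop_iff_isIn (sub := b.toList) (s := nl)).mpr hisin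
        have hjlt : j < nl.length := by
          by_contra hge
          have : nl.drop j = [] := List.drop_eq_nil_of_le (by omega)
          rw [this, List.prefix_nil, hb] at hpre
          cases hpre
        have hdj : ∃ r, nl.drop j = c :: r := by
          obtain ⟨r, hr⟩ := hpre
          rw [hb] at hr
          exact ⟨t ++ r, by rw [← hr]; simp⟩
        obtain ⟨r, hdj⟩ := hdj
        have hcj : nl[j] = c := by
          have h0 : (nl.drop j)[0]'(by rw [hdj]; simp) = c := by simp [hdj]
          simpa using h0
        refine ⟨j, hjlt, ⟨t, by rw [hcj]⟩, ?_⟩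
        unfold pvHit
        rw [Bool.and_eq_true, Bool.or_eq_true]
        exact ⟨Or.inl (by simpa using hlen), by simpa [List.isPrefixOf_iff_prefix] using hpre⟩
  · rintro (rfl | ⟨j, hj, ⟨t, hb⟩, hhit⟩)
    · exact Or.inl ⟨by simp, List.nil_suffix⟩
    · unfold pvHit at hhit
      rw [Bool.and_eq_true, Bool.or_eq_true] at hhit
      obtain ⟨hor, hpre'⟩ := hhit
      have hpre : b.toList <+: nl.drop j := by
        simpa [List.isPrefixOf_iff_prefix] using hpre'
      by_cases h3 : 3 < b.toList.length
      · refine Or.inr ⟨h3, ?_⟩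
        exact (PySem.Chars.isIn_iff_infix _ _).mp
          ((PySem.Chars.exists_prefix_drop_iff_isIn (sub := b.toList) (s := nl)).mp ⟨j, hpre⟩)
      · have hlen : j + b.toList.length = nl.length := by
          rcases hor with h | h
          · exact absurd (by simpa using h) h3
          · simpa using h
        refine Or.inl ⟨by omega, ?_⟩
        have heq : b.toList = nl.drop j :=
          hpre.eq_of_length (by rw [List.length_drop]; omega)
        rw [heq]
        exact List.drop_suffix j nl

-- the pointwise test of A, in list form
theorem pv_pointwise (s : String) (b : String) :
    ((if PySem.Str.len b ≤ 3 then PySem.Str.endswith s b else PySem.Str.isIn b s) = true) ↔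
    ((b.toList.length ≤ 3 ∧ b.toList <:+ s.toList) ∨
     (3 < b.toList.length ∧ b.toList <:+: s.toList)) := by
  have hlen : (PySem.Str.len b ≤ 3) ↔ (b.toList.length ≤ 3) := by
    simp only [PySem.Str.len]
    exact ⟨fun h => by exact_mod_cast h, fun h => by exact_mod_cast h⟩
  by_cases h : b.toList.length ≤ 3
  · rw [if_pos (hlen.mpr h), PySem.Str.endswith_eq, PySem.Chars.endswith_iff]
    constructor
    · intro hs; exact Or.inl ⟨h, hs⟩
    · rintro (⟨-, hs⟩ | ⟨h3, -⟩)
      · exact hs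
      · omega
  · rw [if_neg (fun hc => h (hlen.mp hc)), PySem.Str.isIn_eq, PySem.Chars.isIn_iff_infix]
    constructor
    · intro hs; exact Or.inr ⟨by omega, hs⟩
    · rintro (⟨h3, -⟩ | ⟨-, hs⟩)
      · omega
      · exact hs

-- ===== VERDICT (by name: the statement is the Claim_ definition above) =====
theorem contains_blocked_word_spec : Claim_equal_contains_blocked_word := by
  intro name bl _
  unfold Spec_contains_blocked_word contains_blocked_word contains_blocked_word_alt
  set s := PySem.Str.lower name with hs
  rw [Bool.eq_iff_iff, pvLoopA_eq_any, List.any_eq_true]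
  have hmatch : ∀ b ∈ bl,
      ((if PySem.Str.len b ≤ 3 then PySem.Str.endswith s b else PySem.Str.isIn b s) = true) ↔
      (b = "" ∨ ∃ j, ∃ h : j < s.toList.length,
        (∃ t, b.toList = s.toList[j] :: t) ∧ pvHit s.toList j b = true) := by
    intro b _
    rw [pv_pointwise, pv_match_bridge]
  by_cases hemp : bl.contains ""
  · simp only [hemp, if_pos]
    constructor
    · intro _; trivial
    · intro _
      refine ⟨"", List.contains_iff_mem.mp hemp, ?_⟩
      rw [hmatch "" (List.contains_iff_mem.mp hemp)]
      exact Or.inl rfl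
  · simp only [hemp, Bool.false_eq_true, if_false]
    rw [pvScan_eq_true_iff]
    constructor
    · rintro ⟨b, hbmem, hb⟩
      rcases (hmatch b hbmem).mp hb with rfl | ⟨j, hj, hhead, hhit⟩
      · exact absurd (List.contains_iff_mem.mpr hbmem) hemp
      · refine ⟨j, hj, Nat.zero_le j, ?_⟩
        rw [List.any_eq_true]
        exact ⟨b, (pvIndex_mem bl _ b).mpr ⟨hbmem, by
          obtain ⟨t, ht⟩ := hhead; exact ⟨t, ht⟩⟩, hhit⟩
    · rintro ⟨j, hj, -, ha⟩
      rw [List.any_eq_true] at ha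
      obtain ⟨b, hbkt, hhit⟩ := ha
      obtain ⟨hbmem, t, ht⟩ := (pvIndex_mem bl _ b).mp hbkt
      exact ⟨b, hbmem, (hmatch b hbmem).mpr (Or.inr ⟨j, hj, ⟨t, ht⟩, hhit⟩)⟩
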